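-- pv_equiv track=rewrite | github.com/eic/firebird | pyrobird/pyrobird/edm4eic.py | parse_entry_numbers
-- ===== SOURCE A (Python) =====
-- def parse_entry_numbers(value):
--     """
--     Parses an input string representing entry numbers and returns a list of integers.
--
--     The input can be:
--     - A single integer, e.g., "3"
--     - A range of integers separated by a hyphen, e.g., "1-5"
--     - A comma-separated list of integers or ranges, e.g., "1,2-5,8"
--     - A list, tuple, or set of integers
--
--     Args:
--         value (str, list, tuple, set): Input representing the entry numbers.
--
--     Returns:
--         List[int]: List of parsed integers.
--
--     Raises:
--         ValueError: If the input format is invalid or cannot be parsed into integers.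
--     """
--     try:
--         if isinstance(value, (list, tuple, set)):
--             # Handle list, tuple, or set of integers directly
--             return [int(item) for item in value]
--
--         # Handle range, e.g., "1-5"
--         if '-' in value and ',' not in value:
--             start, end = map(int, value.split('-'))
--             if start > end:
--                 raise ValueError(f"Invalid range '{value}': start must be <= end.")
--             return list(range(start, end + 1))
--
--         # Handle comma-separated list, e.g., "1,2,3" or "1,2-5,8"
--         elif ',' in value:
--             entries = []
--             for entry in value.split(','):
--                 entry = entry.strip()
--                 if '-' in entry:
--                     # Handle range inside comma-separated list
--                     start, end = map(int, entry.split('-'))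
--                     if start > end:
--                         raise ValueError(f"Invalid range '{entry}': start must be <= end.")
--                     entries.extend(range(start, end + 1))
--                 else:
--                     entries.append(int(entry))
--             return entries
--
--         # Handle single integer as string
--         else:
--             return [int(value)]
--
--     except ValueError as ve:
--         raise ValueError(f"Invalid entry format: '{value}'. Expected integers or ranges like '1-5'.")
-- ===== SOURCE B (Python) =====
-- def _parse_str(s):
--     """Recursively consume the string from the RIGHT: peel the last comma-token
--     off with rpartition, handle it (range via partition at its hyphen, else int),
--     and recurse on the remainder.  No split(), no strip(): int() ignores
--     surrounding whitespace and partition finds the hyphen of a valid range itself."""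
--     head, sep, tok = s.rpartition(',')
--     prefix = _parse_str(head) if sep else []
--     if '-' in tok:
--         a, _, b = tok.partition('-')
--         start, end = int(a), int(b)
--         if start > end:
--             raise ValueError(f"Invalid range '{tok}': start must be <= end.")
--         return prefix + list(range(start, end + 1))
--     return prefix + [int(tok)]
--
--
-- def parse_entry_numbers(value):
--     """
--     Parses an input string representing entry numbers and returns a list of integers.
--     Accepts "3", "1-5", "1,2-5,8", or a list/tuple/set of integers.
--     """
--     try:
--         if isinstance(value, (list, tuple, set)):
--             return [int(item) for item in value]
--         return _parse_str(value)
--     except ValueError: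
--         raise ValueError(f"Invalid entry format: '{value}'. Expected integers or ranges like '1-5'.")
-- ===== Notes on version B (the rewrite author's own statement) =====
-- stated objective: alternative
-- what changed: A dispatches over three special-cased string branches and iterates left-to-right over the comma-split list; B is recursive: it peels the last token off the string with rpartition (no split, no strip), parses a range token with partition instead of split, and builds the result back-to-front by recursion on the remainder.
import Mathlib
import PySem

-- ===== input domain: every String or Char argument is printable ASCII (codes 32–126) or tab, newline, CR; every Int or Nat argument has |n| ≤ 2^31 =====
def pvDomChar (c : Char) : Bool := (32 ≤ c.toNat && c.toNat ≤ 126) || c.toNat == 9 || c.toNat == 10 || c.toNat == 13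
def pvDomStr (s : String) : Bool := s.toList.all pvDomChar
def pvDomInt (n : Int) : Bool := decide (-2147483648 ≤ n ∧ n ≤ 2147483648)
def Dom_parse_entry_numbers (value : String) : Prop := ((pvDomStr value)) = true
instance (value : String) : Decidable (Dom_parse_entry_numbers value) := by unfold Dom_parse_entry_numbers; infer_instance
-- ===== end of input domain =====

-- B replaces A's three-branch split-and-loop parser by a right-to-left recursion:
-- rpartition peels the last comma-token, partition splits a range at its hyphen, the result is
-- built back-to-front (objective: alternative; same behaviour on Pre_).  Equivalence is
-- about RETURN values where the Python A returns; where Python raises ValueError both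
-- ports return [] and Pre_ excludes those inputs.

-- ===== PORT A =====
-- str.split(sep) is PySem.Chars.splitOn on .toList; int(s) is PySem.Int.ofChars?.
-- On every path where the Python raises ValueError the port returns [] (excluded by Pre_).
def parse_entry_numbers (value : String) : List Int :=
  -- if '-' in value and ',' not in value:
  if PySem.Str.isIn "-" value && !(PySem.Str.isIn "," value) then
    -- start, end = map(int, value.split('-'))
    match PySem.Chars.splitOn value.toList ['-'] with
    | [a, b] =>
      match PySem.Int.ofChars? a, PySem.Int.ofChars? b with
      | some s, some e => if s > e then [] else PySem.List.pyRange s (e + 1) 1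
      | _, _ => []
    | _ => []   -- unpacking error: Python raises
  -- elif ',' in value:
  else if PySem.Str.isIn "," value then
    (PySem.Chars.splitOn value.toList [',']).foldl (fun acc entry =>
      let e := PySem.Chars.strip entry
      if PySem.Chars.isIn ['-'] e then
        match PySem.Chars.splitOn e ['-'] with
        | [a, b] =>
          match PySem.Int.ofChars? a, PySem.Int.ofChars? b with
          | some s, some en => if s > en then acc else acc ++ PySem.List.pyRange s (en + 1) 1
          | _, _ => acc
        | _ => acc
      else
        match PySem.Int.ofChars? e with
        | some n => acc ++ [n]
        | none => acc) []
  -- else: return [int(value)]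
  else
    match PySem.Int.ofStr? value with
    | some n => [n]
    | none => []

-- ===== PORT B =====
-- s.rpartition(','): PySem has no rpartition, so it is ported by hand, exact for a
-- single-char separator: some (head, tok) when a ',' exists (s = head ++ ',' ++ tok,
-- tok after the LAST comma), none when not (Python's ('', '', s) case).
def pvRSplitLast : List Char → Option (List Char × List Char)
  | [] => none
  | c :: rest =>
    match pvRSplitLast rest with
    | some (h, t) => some (c :: h, t)
    | none => if c = ',' then some ([], rest) else none

-- termination of the recursion below: the head of an rpartition is strictly shorter
theorem pvRSplitLast_lt : ∀ (cs h t : List Char), pvRSplitLast cs = some (h, t) → h.length < cs.length := by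
  intro cs
  induction cs with
  | nil => intro h t hc; simp [pvRSplitLast] at hc
  | cons c rest ih =>
    intro h t hc
    simp only [pvRSplitLast] at hc
    cases hr : pvRSplitLast rest with
    | some p =>
      rw [hr] at hc
      obtain ⟨h', t'⟩ := p
      rw [Option.some_inj, Prod.mk.injEq] at hc
      obtain ⟨hh, ht⟩ := hc
      subst hh
      have := ih h' t' hr
      simp
      omega
    | none =>
      rw [hr] at hc
      by_cases hcc : c = ','
      · simp [hcc] at hc
        obtain ⟨hh, ht⟩ := hc
        subst hh
        simp
      · simp [hcc] at hc

-- tok.partition('-') (only used when '-' is in tok): the text before the FIRST '-' is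
-- takeWhile (· != '-'), the text after it is dropWhile (· != '-') minus the '-' itself.
def pvTokenB (tok : List Char) : List Int :=
  if PySem.Chars.isIn ['-'] tok then
    let a := tok.takeWhile (fun x => x != '-')
    let b := (tok.dropWhile (fun x => x != '-')).drop 1
    match PySem.Int.ofChars? a, PySem.Int.ofChars? b with
    | some s, some e => if s > e then [] else PySem.List.pyRange s (e + 1) 1
    | some _, none => []   -- int() ValueError: Python raises
    | none, some _ => []
    | none, none => []
  else
    match PySem.Int.ofChars? tok with
    | some n => [n]
    | none => []   -- int() ValueError: Python raises

-- _parse_str of Source B: recurse on the part before the last comma, append the last token's values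
def pvParseGo (cs : List Char) : List Int :=
  match hm : pvRSplitLast cs with
  | some (head, tok) => pvParseGo head ++ pvTokenB tok
  | none => pvTokenB cs
termination_by cs.length
decreasing_by exact pvRSplitLast_lt cs head tok hm

def parse_entry_numbers_alt (value : String) : List Int :=
  pvParseGo value.toList

-- ===== PRECONDITION & SPEC =====
-- A token is valid when (after stripping) it is an int literal or a nonempty range a-b with a ≤ b.
def pvTokOK (token : List Char) : Bool :=
  let t := PySem.Chars.strip token
  if PySem.Chars.isIn ['-'] t then
    match PySem.Chars.splitOn t ['-'] with
    | [] => false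
    | [_] => false
    | a :: b :: rest =>
      decide (rest = []) &&
        ((PySem.Int.ofChars? a).bind (fun s =>
          (PySem.Int.ofChars? b).map (fun e => decide (s ≤ e)))).getD false
  else (PySem.Int.ofChars? t).isSome

-- Exactly the strings on which the Python A returns (otherwise it raises ValueError):
-- every comma-separated token is an integer or a well-ordered range.
def Pre_parse_entry_numbers (value : String) : Prop :=
  (PySem.Chars.splitOn value.toList [',']).all pvTokOK = true
instance (value : String) : Decidable (Pre_parse_entry_numbers value) := by
  unfold Pre_parse_entry_numbers; infer_instance

def pvWitness_parse_entry_numbers : String := "1, 3-5 ,8"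

def Spec_parse_entry_numbers (value : String) (out : List Int) : Prop := out = parse_entry_numbers_alt value
instance (value : String) (out : List Int) : Decidable (Spec_parse_entry_numbers value out) := by unfold Spec_parse_entry_numbers; infer_instance

-- ===== CLAIM (what is proved, stated in full; the proofs are below) =====
def Claim_equal_parse_entry_numbers : Prop := ∀ (value : String), Dom_parse_entry_numbers value → Pre_parse_entry_numbers value → Spec_parse_entry_numbers value (parse_entry_numbers value)

-- ===== LEMMAS AND PROOFS =====

-- ---- PySem.Chars.splitOn is List.splitOn for a single-char separator ----
theorem pvGo_spec (c : Char) : ∀ (fuel : Nat) (l cur : List Char) (accs : List (List Char)),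
    l.length < fuel →
    PySem.Chars.splitOn.go [c] fuel l cur accs =
      accs.reverse ++ List.modifyHead (cur.reverse ++ ·) (l.splitOn c) := by
  intro fuel
  induction fuel with
  | zero => intro l cur accs h; omega
  | succ n ih =>
    intro l cur accs h
    cases l with
    | nil =>
      simp [PySem.Chars.splitOn.go, List.splitOn, List.splitOnP_nil]
    | cons x rest =>
      by_cases hx : c = x
      · subst hx
        rw [show PySem.Chars.splitOn.go [c] (n+1) (c :: rest) cur accs
              = PySem.Chars.splitOn.go [c] n (List.drop 1 (c :: rest)) [] (cur.reverse :: accs) by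
            simp [PySem.Chars.splitOn.go, List.isPrefixOf]]
        rw [ih _ _ _ (by simpa using Nat.lt_of_succ_lt_succ h)]
        simp [List.splitOn, List.splitOnP_cons, List.modifyHead]
        cases List.splitOnP (fun x => x == c) rest <;> rfl
      · rw [show PySem.Chars.splitOn.go [c] (n+1) (x :: rest) cur accs
              = PySem.Chars.splitOn.go [c] n rest (x :: cur) accs by
            simp [PySem.Chars.splitOn.go, List.isPrefixOf, hx]]
        rw [ih _ _ _ (by simpa using Nat.lt_of_succ_lt_succ h)]
        have hne : (x == c) = false := by simp; exact fun hh => hx hh.symm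
        simp [List.splitOn, List.splitOnP_cons, hne]
        cases hsp : List.splitOnP (· == c) rest with
        | nil => exact absurd hsp (List.splitOnP_ne_nil _ _)
        | cons y ys => simp [List.modifyHead]

theorem pvSplitOn_eq (cs : List Char) (c : Char) :
    PySem.Chars.splitOn cs [c] = cs.splitOn c := by
  unfold PySem.Chars.splitOn
  rw [pvGo_spec c _ _ _ _ (by omega)]
  cases h : cs.splitOn c with
  | nil => exact absurd h (List.splitOnP_ne_nil _ _)
  | cons y ys => simp [List.modifyHead]

theorem pvSplitOn_single {c : Char} {l : List Char} (h : c ∉ l) : l.splitOn c = [l] := by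
  induction l with
  | nil => simp [List.splitOn, List.splitOnP_nil]
  | cons x rest ih =>
    simp only [List.mem_cons, not_or] at h
    have hne : (x == c) = false := by simp; exact fun hh => h.1 hh.symm
    simp [List.splitOn, List.splitOnP_cons, hne] at ih ⊢
    rw [ih h.2]
    rfl

-- converse direction: a one-piece split means no separator
theorem pvSplitOn_one {c : Char} : ∀ {l a : List Char}, l.splitOn c = [a] → l = a ∧ c ∉ l := by
  intro l
  induction l with
  | nil => intro a h; simp [List.splitOn, List.splitOnP_nil] at h; subst h; exact ⟨rfl, by simp⟩
  | cons x rest ih =>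
    intro a h
    by_cases hx : x = c
    · subst hx
      simp only [List.splitOn, List.splitOnP_cons, beq_self_eq_true] at h
      cases hr : List.splitOnP (fun y => y == x) rest with
      | nil => exact absurd hr (List.splitOnP_ne_nil _ _)
      | cons z zs => rw [hr] at h; simp at h
    · have hne : (x == c) = false := by simp [hx]
      simp only [List.splitOn, List.splitOnP_cons, hne] at h ih
      cases hr : List.splitOnP (fun y => y == c) rest with
      | nil => exact absurd hr (List.splitOnP_ne_nil _ _)
      | cons z zs =>
        rw [hr] at h
        simp [List.modifyHead] at h
        obtain ⟨ha, hzs⟩ := h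
        have := ih (a := z) (by rw [hr, hzs])
        refine ⟨by rw [← ha, this.1], ?_⟩
        simp
        exact ⟨fun hh => hx hh.symm, this.2⟩

-- a two-piece split exhibits the unique separator position
theorem pvSplitOn_pair {c : Char} : ∀ {l a b : List Char}, l.splitOn c = [a, b] → l = a ++ c :: b ∧ c ∉ a ∧ c ∉ b := by
  intro l
  induction l with
  | nil => intro a b h; simp [List.splitOn, List.splitOnP_nil] at h
  | cons x rest ih =>
    intro a b h
    by_cases hx : x = c
    · subst hx
      simp only [List.splitOn, List.splitOnP_cons, beq_self_eq_true] at h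
      cases hr : List.splitOnP (fun y => y == x) rest with
      | nil => exact absurd hr (List.splitOnP_ne_nil _ _)
      | cons z zs =>
        rw [hr] at h
        simp at h
        obtain ⟨ha, hz, hzs⟩ := h
        have hone := pvSplitOn_one (c := x) (l := rest) (a := b)
          (by show List.splitOnP _ rest = _; rw [hr, hz, hzs])
        exact ⟨by simp [ha, hone.1], by simp [ha], hone.1 ▸ hone.2⟩
    · have hne : (x == c) = false := by simp [hx]
      simp only [List.splitOn, List.splitOnP_cons, hne] at h ih
      cases hr : List.splitOnP (fun y => y == c) rest with
      | nil => exact absurd hr (List.splitOnP_ne_nil _ _)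
      | cons z zs =>
        rw [hr] at h
        simp [List.modifyHead] at h
        obtain ⟨ha, hzs⟩ := h
        have := ih (a := z) (b := b) (by rw [hr, hzs])
        refine ⟨by rw [← ha]; simp [this.1], ?_, this.2.2⟩
        rw [← ha]
        simp
        exact ⟨fun hh => hx hh.symm, this.2.1⟩

-- splitting off the segment after the LAST separator
theorem pvSplitOn_append_last {c : Char} : ∀ (h t : List Char), c ∉ t →
    (h ++ c :: t).splitOn c = h.splitOn c ++ [t] := by
  intro h
  induction h with
  | nil =>
    intro t ht
    simp only [List.nil_append, List.splitOn, List.splitOnP_cons, beq_self_eq_true]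
    rw [show List.splitOnP (fun y => y == c) t = t.splitOn c from rfl, pvSplitOn_single ht]
    simp [List.splitOn, List.splitOnP_nil]
  | cons x h' ih =>
    intro t ht
    by_cases hx : x = c
    · subst hx
      simp only [List.cons_append, List.splitOn, List.splitOnP_cons, beq_self_eq_true]
      have := ih t ht
      simp only [List.splitOn] at this
      rw [this]
      simp
    · have hne : (x == c) = false := by simp [hx]
      simp only [List.cons_append, List.splitOn, List.splitOnP_cons, hne]
      have := ih t ht
      simp only [List.splitOn] at this
      rw [this]
      cases hr : List.splitOnP (fun y => y == c) h' with
      | nil => exact absurd hr (List.splitOnP_ne_nil _ _)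
      | cons z zs => simp [List.modifyHead]

theorem pvSplitOn_two {c : Char} {p q : List Char} (hp : c ∉ p) (hq : c ∉ q) :
    (p ++ c :: q).splitOn c = [p, q] := by
  rw [pvSplitOn_append_last p q hq, pvSplitOn_single hp]
  rfl

-- ---- pvRSplitLast: the specification of rpartition ----
theorem pvRSplitLast_none : ∀ (cs : List Char), pvRSplitLast cs = none ↔ ',' ∉ cs := by
  intro cs
  induction cs with
  | nil => simp [pvRSplitLast]
  | cons c rest ih =>
    constructor
    · intro h
      simp only [pvRSplitLast] at h
      cases hr : pvRSplitLast rest with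
      | some p =>
        obtain ⟨h', t'⟩ := p
        rw [hr] at h
        simp at h
      | none =>
        rw [hr] at h
        by_cases hc : c = ','
        · rw [if_pos hc] at h; simp at h
        · rw [if_neg hc] at h
          intro hmem
          rcases List.mem_cons.mp hmem with hh | hh
          · exact hc hh.symm
          · exact (ih.mp hr) hh
    · intro h
      simp only [List.mem_cons, not_or] at h
      have hn : pvRSplitLast rest = none := ih.mpr h.2
      simp only [pvRSplitLast, hn]
      rw [if_neg (fun hh => h.1 hh.symm)]

theorem pvRSplitLast_some : ∀ (cs h t : List Char), pvRSplitLast cs = some (h, t) →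
    cs = h ++ ',' :: t ∧ ',' ∉ t := by
  intro cs
  induction cs with
  | nil => intro h t hc; simp [pvRSplitLast] at hc
  | cons c rest ih =>
    intro h t hc
    simp only [pvRSplitLast] at hc
    cases hr : pvRSplitLast rest with
    | some p =>
      rw [hr] at hc
      obtain ⟨h', t'⟩ := p
      rw [Option.some_inj, Prod.mk.injEq] at hc
      obtain ⟨h1, h2⟩ := ih h' t' hr
      rw [← hc.1, ← hc.2]
      exact ⟨by rw [h1]; rfl, h2⟩
    | none =>
      rw [hr] at hc
      by_cases hcc : c = ','
      · simp [hcc] at hc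
        obtain ⟨hh, htt⟩ := hc
        subst hh; subst htt
        exact ⟨by simp [hcc], (pvRSplitLast_none rest).mp hr⟩
      · simp [hcc] at hc

-- unfolding equations of B's recursion
theorem pvParseGo_some {cs h t : List Char} (hm : pvRSplitLast cs = some (h, t)) :
    pvParseGo cs = pvParseGo h ++ pvTokenB t := by
  rw [pvParseGo]
  split
  · rename_i head tok heq
    rw [hm] at heq
    rw [Option.some_inj, Prod.mk.injEq] at heq
    rw [heq.1, heq.2]
  · rename_i heq
    rw [hm] at heq
    simp at heq

theorem pvParseGo_none {cs : List Char} (hm : pvRSplitLast cs = none) :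
    pvParseGo cs = pvTokenB cs := by
  rw [pvParseGo]
  split
  · rename_i head tok heq
    rw [hm] at heq
    simp at heq
  · rfl

-- B's recursion computes the flatMap over the comma-split
theorem pvGoB : ∀ (cs : List Char), pvParseGo cs = (cs.splitOn ',').flatMap pvTokenB := by
  intro cs
  induction hn : cs.length using Nat.strong_induction_on generalizing cs with
  | _ n ih =>
    cases hm : pvRSplitLast cs with
    | none =>
      rw [pvParseGo_none hm, pvSplitOn_single ((pvRSplitLast_none cs).mp hm)]
      simp
    | some p =>
      obtain ⟨head, tok⟩ := p
      obtain ⟨hdec, hnt⟩ := pvRSplitLast_some cs head tok hm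
      rw [pvParseGo_some hm, hdec, pvSplitOn_append_last head tok hnt, List.flatMap_append]
      have hlt := pvRSplitLast_lt cs head tok hm
      rw [ih head.length (by omega) head rfl]
      simp

-- chars of a split token are chars of the string
theorem pvMemSplit {c x : Char} : ∀ {cs l : List Char}, l ∈ cs.splitOn c → x ∈ l → x ∈ cs := by
  intro cs
  induction cs with
  | nil => intro l hl hx; simp [List.splitOn, List.splitOnP_nil] at hl; simp [hl] at hx
  | cons y rest ih =>
    intro l hl hx
    by_cases hy : y = c
    · subst hy
      simp only [List.splitOn, List.splitOnP_cons, beq_self_eq_true] at hl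
      rcases List.mem_cons.mp hl with h | h
      · simp [h] at hx
      · exact List.mem_cons_of_mem _ (ih h hx)
    · have hne : (y == c) = false := by simp [hy]
      simp only [List.splitOn, List.splitOnP_cons, hne] at hl ih
      cases hr : List.splitOnP (fun z => z == c) rest with
      | nil => exact absurd hr (List.splitOnP_ne_nil _ _)
      | cons z zs =>
        rw [hr] at hl
        simp [List.modifyHead] at hl
        rcases hl with h | h
        · rw [h] at hx
          rcases List.mem_cons.mp hx with h2 | h2
          · simp [h2]
          · exact List.mem_cons_of_mem _ (ih (by rw [hr]; exact List.mem_cons_self) h2)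
        · exact List.mem_cons_of_mem _ (ih (by rw [hr]; exact List.mem_cons_of_mem _ h) hx)

-- ---- whitespace / int-parsing bridge (strip is inert for int()) ----
def pvW1 (cs : List Char) : List Char := cs.takeWhile PySem.Chars.isspace
def pvW2 (cs : List Char) : List Char :=
  ((PySem.Chars.lstrip cs).reverse.takeWhile PySem.Chars.isspace).reverse

theorem pvStrip_decomp (cs : List Char) :
    cs = pvW1 cs ++ PySem.Chars.strip cs ++ pvW2 cs := by
  unfold pvW1 pvW2 PySem.Chars.strip PySem.Chars.rstrip PySem.Chars.lstrip
  conv_lhs => rw [← List.takeWhile_append_dropWhile (p := PySem.Chars.isspace) (l := cs)]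
  rw [List.append_assoc]
  congr 1
  rw [show List.dropWhile PySem.Chars.isspace cs
        = PySem.Chars.lstrip cs from rfl]
  conv_lhs => rw [← List.reverse_reverse (PySem.Chars.lstrip cs),
    ← List.takeWhile_append_dropWhile (p := PySem.Chars.isspace) (l := (PySem.Chars.lstrip cs).reverse)]
  rw [List.reverse_append]

theorem pvSpace_int {c : Char} (hd : pvDomChar c = true) (hs : PySem.Chars.isspace c = true) :
    PySem.Int.isIntSpace c = true := by
  have hchar : ∀ (n : Nat), c.toNat = n → ∀ (d : Char), d.toNat = n → c = d := by
    intro n h1 d h2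
    apply Char.ext
    apply UInt32.toNat_inj.mp
    show c.toNat = d.toNat
    omega
  have h9 : c.toNat = 9 → c = '\t' := fun hh => hchar 9 hh '\t' rfl
  have h10 : c.toNat = 10 → c = '\n' := fun hh => hchar 10 hh '\n' rfl
  have h13 : c.toNat = 13 → c = '\r' := fun hh => hchar 13 hh '\r' rfl
  have h32 : c.toNat = 32 → c = ' ' := fun hh => hchar 32 hh ' ' rfl
  have hn : c.toNat = 9 ∨ c.toNat = 10 ∨ c.toNat = 13 ∨ c.toNat = 32 := by
    unfold pvDomChar at hd
    unfold PySem.Chars.isspace at hs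
    simp only [Bool.or_eq_true, Bool.and_eq_true, decide_eq_true_eq, beq_iff_eq] at hd hs
    omega
  rcases hn with h | h | h | h
  · rw [h9 h]; decide
  · rw [h10 h]; decide
  · rw [h13 h]; decide
  · rw [h32 h]; decide

def pvNorm (l : List Char) : List Char :=
  (List.dropWhile PySem.Int.isIntSpace (List.dropWhile PySem.Int.isIntSpace l).reverse).reverse

theorem pvOfChars_congr {a b : List Char} (h : pvNorm a = pvNorm b) :
    PySem.Int.ofChars? a = PySem.Int.ofChars? b := by
  unfold PySem.Int.ofChars?
  unfold pvNorm at h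
  rw [h]

theorem pvNorm_left {w a : List Char} (h : ∀ c ∈ w, PySem.Int.isIntSpace c = true) :
    pvNorm (w ++ a) = pvNorm a := by
  unfold pvNorm
  rw [List.dropWhile_append, if_pos (by simp [List.isEmpty_iff, List.dropWhile_eq_nil_iff]; exact h)]

theorem pvNorm_right {w a : List Char} (h : ∀ c ∈ w, PySem.Int.isIntSpace c = true) :
    pvNorm (a ++ w) = pvNorm a := by
  unfold pvNorm
  have hw : List.dropWhile PySem.Int.isIntSpace w = [] :=
    List.dropWhile_eq_nil_iff.mpr h
  rw [List.dropWhile_append]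
  by_cases ha : (List.dropWhile PySem.Int.isIntSpace a).isEmpty
  · rw [if_pos ha, hw]
    simp only [List.isEmpty_iff] at ha
    rw [ha]
  · rw [if_neg ha, List.reverse_append, List.dropWhile_append,
      if_pos (by simp [List.isEmpty_iff, List.dropWhile_eq_nil_iff]; intro c hc; exact h c hc)]

theorem pvW1_space {cs : List Char} {x : Char} (h : x ∈ pvW1 cs) : PySem.Chars.isspace x = true :=
  List.mem_takeWhile_imp h

theorem pvW2_space {cs : List Char} {x : Char} (h : x ∈ pvW2 cs) : PySem.Chars.isspace x = true := by
  unfold pvW2 at h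
  exact List.mem_takeWhile_imp (List.mem_reverse.mp h)

theorem pvOfChars_strip {cs : List Char} (hd : ∀ c ∈ cs, pvDomChar c = true) :
    PySem.Int.ofChars? (PySem.Chars.strip cs) = PySem.Int.ofChars? cs := by
  apply pvOfChars_congr
  have hdec := pvStrip_decomp cs
  have hw1 : ∀ c ∈ pvW1 cs, PySem.Int.isIntSpace c = true := by
    intro c hc
    exact pvSpace_int (hd c (by rw [hdec]; simp [hc])) (List.mem_takeWhile_imp hc)
  have hw2 : ∀ c ∈ pvW2 cs, PySem.Int.isIntSpace c = true := by
    intro c hc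
    refine pvSpace_int (hd c (by rw [hdec]; simp [hc])) ?_
    exact pvW2_space hc
  conv_rhs => rw [hdec]
  rw [List.append_assoc, pvNorm_left hw1, pvNorm_right hw2]

theorem pvMem_strip_iff {x : Char} {cs : List Char} (hx : PySem.Chars.isspace x = false) :
    x ∈ PySem.Chars.strip cs ↔ x ∈ cs := by
  constructor
  · intro h
    rw [pvStrip_decomp cs]
    simp [h]
  · intro h
    rw [pvStrip_decomp cs] at h
    simp only [List.mem_append, List.mem_append] at h
    rcases h with (h | h) | h
    · exact absurd (pvW1_space h) (by simp [hx])
    · exact h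
    · exact absurd (pvW2_space h) (by simp [hx])

theorem pvIsIn_single {c : Char} {l : List Char} :
    PySem.Chars.isIn [c] l = true ↔ c ∈ l := by
  rw [PySem.Chars.isIn_iff_infix]
  constructor
  · rintro ⟨s, t, h⟩
    subst h
    simp
  · intro h
    obtain ⟨s, t, h⟩ := List.append_of_mem h
    exact ⟨s, t, by rw [h]; simp⟩

-- takeWhile/dropWhile at the unique '-' (the partition decomposition)
theorem pvTakeWhile_find : ∀ {p : List Char} (q : List Char), '-' ∉ p →
    (p ++ '-' :: q).takeWhile (fun x => x != '-') = p ∧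
    (p ++ '-' :: q).dropWhile (fun x => x != '-') = '-' :: q := by
  intro p
  induction p with
  | nil => intro q _; simp [List.takeWhile, List.dropWhile]
  | cons x rest ih =>
    intro q h
    simp only [List.mem_cons, not_or] at h
    have hx : (x != '-') = true := by simp; exact fun hh => h.1 hh.symm
    obtain ⟨h1, h2⟩ := ih q h.2
    constructor
    · simp only [List.cons_append, List.takeWhile_cons, hx, if_true]
      rw [h1]
    · simp only [List.cons_append, List.dropWhile_cons, hx, if_true]
      rw [h2]

-- ---- A's per-token value (the body of its comma loop), and its agreement with B's ----
def pvTokA (entry : List Char) : List Int :=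
  let e := PySem.Chars.strip entry
  if PySem.Chars.isIn ['-'] e then
    match PySem.Chars.splitOn e ['-'] with
    | [a, b] =>
      match PySem.Int.ofChars? a, PySem.Int.ofChars? b with
      | some s, some en => if s > en then [] else PySem.List.pyRange s (en + 1) 1
      | _, _ => []
    | _ => []
  else
    match PySem.Int.ofChars? e with
    | some n => [n]
    | none => []

theorem pvFoldA (toks : List (List Char)) (acc : List Int) :
    toks.foldl (fun acc entry =>
      let e := PySem.Chars.strip entry
      if PySem.Chars.isIn ['-'] e then
        match PySem.Chars.splitOn e ['-'] with
        | [a, b] =>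
          match PySem.Int.ofChars? a, PySem.Int.ofChars? b with
          | some s, some en => if s > en then acc else acc ++ PySem.List.pyRange s (en + 1) 1
          | _, _ => acc
        | _ => acc
      else
        match PySem.Int.ofChars? e with
        | some n => acc ++ [n]
        | none => acc) acc = acc ++ toks.flatMap pvTokA := by
  induction toks generalizing acc with
  | nil => simp
  | cons t ts ih =>
    rw [List.foldl_cons, ih, List.flatMap_cons, ← List.append_assoc]
    congr 1
    cases h1 : PySem.Chars.isIn ['-'] (PySem.Chars.strip t) with
    | false =>
      cases h2 : PySem.Int.ofChars? (PySem.Chars.strip t) with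
      | none => simp [pvTokA, h1, h2]
      | some n => simp [pvTokA, h1, h2]
    | true =>
      cases h2 : PySem.Chars.splitOn (PySem.Chars.strip t) ['-'] with
      | nil => simp [pvTokA, h1, h2]
      | cons a l =>
        cases l with
        | nil => simp [pvTokA, h1, h2]
        | cons b l2 =>
          cases l2 with
          | cons cc l3 => simp [pvTokA, h1, h2]
          | nil =>
            cases h3 : PySem.Int.ofChars? a with
            | none =>
              cases h4 : PySem.Int.ofChars? b with
              | none => simp [pvTokA, h1, h2, h3, h4]
              | some eE => simp [pvTokA, h1, h2, h3, h4]
            | some sS =>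
              cases h4 : PySem.Int.ofChars? b with
              | none => simp [pvTokA, h1, h2, h3, h4]
              | some eE =>
                by_cases h5 : sS > eE
                · simp [pvTokA, h1, h2, h3, h4, h5]
                · simp [pvTokA, h1, h2, h3, h4, h5]

-- the hyphen-range computation: B's partition-based parse of a valid range token
theorem pvTokenB_range {tok a b : List Char} {s e : Int}
    (hd : ∀ c ∈ tok, pvDomChar c = true)
    (hsp : PySem.Chars.splitOn (PySem.Chars.strip tok) ['-'] = [a, b])
    (hs : PySem.Int.ofChars? a = some s) (he : PySem.Int.ofChars? b = some e) :
    pvTokenB tok = if s > e then [] else PySem.List.pyRange s (e + 1) 1 := by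
  rw [pvSplitOn_eq] at hsp
  obtain ⟨hdec0, hna, hnb⟩ := pvSplitOn_pair hsp
  have hdashspace : PySem.Chars.isspace '-' = false := by decide
  have hmem : ('-' : Char) ∈ tok := by
    rw [← pvMem_strip_iff hdashspace, hdec0]
    simp
  have hdecomp : tok = (pvW1 tok ++ a) ++ '-' :: (b ++ pvW2 tok) := by
    conv_lhs => rw [pvStrip_decomp tok, hdec0]
    simp
  have hnw1 : ('-' : Char) ∉ pvW1 tok := fun h => by
    have := pvW1_space h; rw [hdashspace] at this; exact Bool.false_ne_true this
  have hnw2 : ('-' : Char) ∉ pvW2 tok := fun h => by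
    have := pvW2_space h; rw [hdashspace] at this; exact Bool.false_ne_true this
  have hnp : ('-' : Char) ∉ pvW1 tok ++ a := by simp [hnw1, hna]
  obtain ⟨htake, hdrop⟩ := pvTakeWhile_find (p := pvW1 tok ++ a) (b ++ pvW2 tok) hnp
  have hw1m : ∀ c ∈ pvW1 tok, c ∈ tok := by
    intro c h; rw [pvStrip_decomp tok]; simp [h]
  have hw2m : ∀ c ∈ pvW2 tok, c ∈ tok := by
    intro c h; rw [pvStrip_decomp tok]; simp [h]
  have hw1s : ∀ c ∈ pvW1 tok, PySem.Int.isIntSpace c = true := fun c h =>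
    pvSpace_int (hd c (hw1m c h)) (pvW1_space h)
  have hw2s : ∀ c ∈ pvW2 tok, PySem.Int.isIntSpace c = true := fun c h =>
    pvSpace_int (hd c (hw2m c h)) (pvW2_space h)
  unfold pvTokenB
  rw [if_pos (pvIsIn_single.mpr hmem)]
  conv_lhs => rw [hdecomp]
  rw [htake, hdrop]
  simp only [List.drop_one, List.tail_cons]
  rw [pvOfChars_congr (pvNorm_left hw1s), pvOfChars_congr (pvNorm_right hw2s), hs, he]

-- extraction from a valid token and agreement of the two per-token parsers
theorem pvTok_eq {tok : List Char} (hd : ∀ c ∈ tok, pvDomChar c = true)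
    (hok : pvTokOK tok = true) : pvTokA tok = pvTokenB tok := by
  have hdashspace : PySem.Chars.isspace '-' = false := by decide
  simp only [pvTokOK] at hok
  simp only [pvTokA]
  cases h1 : PySem.Chars.isIn ['-'] (PySem.Chars.strip tok) with
  | true =>
    rw [h1] at hok
    simp only [if_true] at hok ⊢
    cases h2 : PySem.Chars.splitOn (PySem.Chars.strip tok) ['-'] with
    | nil => rw [h2] at hok; simp at hok
    | cons a l =>
      cases l with
      | nil => rw [h2] at hok; simp at hok
      | cons b l2 =>
        rw [h2] at hok
        simp only [Bool.and_eq_true, decide_eq_true_eq] at hok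
        obtain ⟨hrest, hok2⟩ := hok
        subst hrest
        cases h3 : PySem.Int.ofChars? a with
        | none => rw [h3] at hok2; simp at hok2
        | some s =>
          cases h4 : PySem.Int.ofChars? b with
          | none => rw [h3, h4] at hok2; simp at hok2
          | some e =>
            rw [pvTokenB_range hd h2 h3 h4]
            show (match PySem.Int.ofChars? a, PySem.Int.ofChars? b with
              | some s, some en => if s > en then [] else PySem.List.pyRange s (en + 1) 1
              | _, _ => []) = _
            rw [h3, h4]
  | false =>
    rw [h1] at hok
    simp only [Bool.false_eq_true, if_false] at hok ⊢
    have hmem : ('-' : Char) ∉ tok := by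
      intro h
      rw [← pvMem_strip_iff hdashspace] at h
      exact absurd (pvIsIn_single.mpr h) (by simp [h1])
    have hIn : PySem.Chars.isIn ['-'] tok = false :=
      Bool.eq_false_iff.mpr (fun h => hmem (pvIsIn_single.mp h))
    unfold pvTokenB
    rw [hIn]
    simp only [Bool.false_eq_true, if_false]
    rw [pvOfChars_strip hd]

theorem pvFlatMap_congr {l : List (List Char)} {f g : List Char → List Int}
    (h : ∀ t ∈ l, f t = g t) : l.flatMap f = l.flatMap g := by
  induction l with
  | nil => rfl
  | cons x xs ih =>
    rw [List.flatMap_cons, List.flatMap_cons, h x List.mem_cons_self,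
      ih (fun t ht => h t (List.mem_cons_of_mem _ ht))]

-- A = B on Pre_ within the ASCII domain
theorem pvMain (value : String) (hDom : Dom_parse_entry_numbers value)
    (hPre : Pre_parse_entry_numbers value) :
    parse_entry_numbers value = parse_entry_numbers_alt value := by
  have hD : ∀ c ∈ value.toList, pvDomChar c = true := by
    unfold Dom_parse_entry_numbers pvDomStr at hDom
    simpa [List.all_eq_true] using hDom
  unfold Pre_parse_entry_numbers at hPre
  rw [pvSplitOn_eq, List.all_eq_true] at hPre
  unfold parse_entry_numbers parse_entry_numbers_alt
  rw [pvGoB]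
  rw [show PySem.Str.isIn "-" value = PySem.Chars.isIn ['-'] value.toList from rfl,
      show PySem.Str.isIn "," value = PySem.Chars.isIn [','] value.toList from rfl]
  have hTokEq : ∀ t ∈ value.toList.splitOn ',', pvTokA t = pvTokenB t := by
    intro t ht
    exact pvTok_eq (fun c hc => hD c (pvMemSplit ht hc)) (hPre t ht)
  by_cases hc : (',' ∈ value.toList)
  · -- comma present: A's loop is the flatMap of its per-token values
    rw [pvIsIn_single.mpr hc]
    simp only [Bool.not_true, Bool.and_false, Bool.false_eq_true, if_false, if_true]
    rw [show PySem.Chars.splitOn value.toList [','] = value.toList.splitOn ',' from pvSplitOn_eq _ _]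
    rw [pvFoldA, List.nil_append]
    exact pvFlatMap_congr hTokEq
  · -- no comma: one token, namely the whole string
    have hcF : PySem.Chars.isIn [','] value.toList = false :=
      Bool.eq_false_iff.mpr (fun h => hc (pvIsIn_single.mp h))
    rw [hcF]
    have hone : value.toList.splitOn ',' = [value.toList] := pvSplitOn_single hc
    have hokv : pvTokOK value.toList = true := hPre _ (by rw [hone]; exact List.mem_cons_self)
    rw [hone]
    simp only [List.flatMap_cons, List.flatMap_nil, List.append_nil]
    have hdashspace : PySem.Chars.isspace '-' = false := by decide
    by_cases hd2 : ('-' ∈ value.toList)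
    · -- A's un-stripped range branch equals B's partition parse of the whole string
      rw [pvIsIn_single.mpr hd2]
      simp only [Bool.not_false, Bool.and_true, if_true]
      have hstm : ('-' : Char) ∈ PySem.Chars.strip value.toList :=
        (pvMem_strip_iff hdashspace).mpr hd2
      -- extract the valid-range shape from pvTokOK
      simp only [pvTokOK] at hokv
      rw [if_pos (pvIsIn_single.mpr hstm)] at hokv
      cases h2 : PySem.Chars.splitOn (PySem.Chars.strip value.toList) ['-'] with
      | nil => rw [h2] at hokv; simp at hokv
      | cons a l =>
        cases l with
        | nil => rw [h2] at hokv; simp at hokv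
        | cons b l2 =>
          rw [h2] at hokv
          simp only [Bool.and_eq_true, decide_eq_true_eq] at hokv
          obtain ⟨hrest, hok2⟩ := hokv
          subst hrest
          cases h3 : PySem.Int.ofChars? a with
          | none => rw [h3] at hok2; simp at hok2
          | some s =>
            cases h4 : PySem.Int.ofChars? b with
            | none => rw [h3, h4] at hok2; simp at hok2
            | some e =>
              -- A: value.splitOn '-' = [w1 ++ a, b ++ w2]; both parse to s, e
              have h2' := h2
              rw [pvSplitOn_eq] at h2'
              obtain ⟨hdec0, hna, hnb⟩ := pvSplitOn_pair h2'
              have hnw1 : ('-' : Char) ∉ pvW1 value.toList := fun h => by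
                have := pvW1_space h; rw [hdashspace] at this; exact Bool.false_ne_true this
              have hnw2 : ('-' : Char) ∉ pvW2 value.toList := fun h => by
                have := pvW2_space h; rw [hdashspace] at this; exact Bool.false_ne_true this
              have hdecomp : value.toList = (pvW1 value.toList ++ a) ++ '-' :: (b ++ pvW2 value.toList) := by
                conv_lhs => rw [pvStrip_decomp value.toList, hdec0]
                simp
              have hw1s : ∀ c ∈ pvW1 value.toList, PySem.Int.isIntSpace c = true := fun c h =>
                pvSpace_int (hD c (by rw [pvStrip_decomp value.toList]; simp [h])) (pvW1_space h)
              have hw2s : ∀ c ∈ pvW2 value.toList, PySem.Int.isIntSpace c = true := fun c h =>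
                pvSpace_int (hD c (by rw [pvStrip_decomp value.toList]; simp [h])) (pvW2_space h)
              have hsplitv : PySem.Chars.splitOn value.toList ['-']
                  = [pvW1 value.toList ++ a, b ++ pvW2 value.toList] := by
                rw [pvSplitOn_eq]
                conv_lhs => rw [hdecomp]
                exact pvSplitOn_two (by simp [hnw1, hna]) (by simp [hnb, hnw2])
              rw [hsplitv]
              show (match PySem.Int.ofChars? (pvW1 value.toList ++ a), PySem.Int.ofChars? (b ++ pvW2 value.toList) with
                | some s, some e => if s > e then [] else PySem.List.pyRange s (e + 1) 1
                | _, _ => []) = _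
              rw [pvOfChars_congr (pvNorm_left hw1s), pvOfChars_congr (pvNorm_right hw2s), h3, h4]
              rw [pvTokenB_range hD h2 h3 h4]
    · -- no hyphen either: both are [int(value)]
      have hdF : PySem.Chars.isIn ['-'] value.toList = false :=
        Bool.eq_false_iff.mpr (fun h => hd2 (pvIsIn_single.mp h))
      rw [hdF]
      simp only [Bool.false_eq_true, if_false]
      unfold pvTokenB
      rw [hdF]
      simp only [Bool.false_eq_true, if_false]
      rfl

-- ===== VERDICT (by name: the statement is the Claim_ definition above) =====
theorem parse_entry_numbers_spec : Claim_equal_parse_entry_numbers := by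
  intro value hDom hPre
  unfold Spec_parse_entry_numbers
  exact pvMain value hDom hPre
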